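-- pv_equiv track=rewrite | github.com/evelynV-exe/codeWar | 8kyu/sumWithoutHighandLowNum.py | sum_array
-- ===== SOURCE A (Python) =====
-- def sum_array(arr):
--     if arr is None or arr == [] or len(arr) <= 2:
--         return 0
--
--     # remove the maximum number and lowest number
--     arrCopy = arr.copy()
--     arrCopy.remove(max(arr))
--     arrCopy.remove(min(arr))
--
--     solution = 0
--     for num in arrCopy:
--         solution += num
--
--     return solution
-- ===== SOURCE B (Python) =====
-- def sum_array(arr):
--     if arr is None or arr == [] or len(arr) <= 2:
--         return 0
--     return sum(arr) - max(arr) - min(arr)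
-- ===== Notes on version B (the rewrite author's own statement) =====
-- stated objective: simpler
-- what changed: Replaces the copy/remove/accumulate loop with the closed form sum(arr) - max(arr) - min(arr), valid even with duplicate extrema.
import Mathlib
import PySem

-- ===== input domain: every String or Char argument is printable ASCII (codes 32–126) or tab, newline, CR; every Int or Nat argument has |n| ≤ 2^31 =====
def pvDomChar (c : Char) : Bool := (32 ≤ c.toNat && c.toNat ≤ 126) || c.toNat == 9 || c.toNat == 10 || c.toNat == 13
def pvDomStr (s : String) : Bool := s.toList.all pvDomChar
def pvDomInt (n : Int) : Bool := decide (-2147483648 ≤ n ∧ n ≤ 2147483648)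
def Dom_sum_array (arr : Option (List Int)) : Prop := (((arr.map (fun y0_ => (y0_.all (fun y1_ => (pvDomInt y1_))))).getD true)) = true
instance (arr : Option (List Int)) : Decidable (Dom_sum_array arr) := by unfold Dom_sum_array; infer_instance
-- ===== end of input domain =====

-- B replaces A's copy/remove/accumulate loop with the closed form sum(arr) - max(arr) - min(arr) (simpler).

-- ===== PORT A =====
-- literal port: guard, copy, remove max then min (remove? is total only because the
-- extrema are members; the `none` fall-throughs are unreachable), then the sum loop
def sum_array (arr : Option (List Int)) : Int :=
  match arr with
  | none => 0
  | some xs =>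
    if xs = [] ∨ (xs.length : Int) ≤ 2 then 0
    else
      match PySem.List.max? xs (fun y => y), PySem.List.min? xs (fun y => y) with
      | some mx, some mn =>
        match PySem.List.remove? xs mx with
        | some c1 =>
          match PySem.List.remove? c1 mn with
          | some c2 => c2.foldl (fun acc num => acc + num) 0
          | none => 0
        | none => 0
      | _, _ => 0

-- ===== PORT B =====
def sum_array_alt (arr : Option (List Int)) : Int :=
  match arr with
  | none => 0
  | some xs =>
    if xs = [] ∨ (xs.length : Int) ≤ 2 then 0
    else
      match xs with
      | [] => 0
      | h :: t => xs.sum - t.foldl max h - t.foldl min h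

-- ===== PRECONDITION & SPEC =====
def Spec_sum_array (arr : Option (List Int)) (out : Int) : Prop := out = sum_array_alt arr
instance (arr : Option (List Int)) (out : Int) : Decidable (Spec_sum_array arr out) := by unfold Spec_sum_array; infer_instance

-- ===== CLAIM (what is proved, stated in full; the proofs are below) =====
def Claim_equal_sum_array : Prop := ∀ (arr : Option (List Int)), Dom_sum_array arr → Spec_sum_array arr (sum_array arr)

-- ===== LEMMAS AND PROOFS =====

theorem pv_sum_erase (xs : List Int) (a : Int) (h : a ∈ xs) :
    (xs.erase a).sum = xs.sum - a := by
  have := (List.perm_cons_erase h).sum_eq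
  simp at this
  omega

theorem pv_mem_erase_extrema (h : Int) (t : List Int) (hlen : 2 ≤ t.length)
    (hmn : PySem.List.min? (h :: t) (fun y => y) = some (t.foldl min h))
    (hmx : PySem.List.max? (h :: t) (fun y => y) = some (t.foldl max h)) :
    t.foldl min h ∈ (h :: t).erase (t.foldl max h) := by
  set mn := t.foldl min h with hmndef
  set mx := t.foldl max h with hmxdef
  by_cases hne : mn = mx
  · -- all elements equal mx; the erased list is nonempty and each element = mx = mn
    have hlo := PySem.List.min?_isMin hmn
    have hhi := PySem.List.max?_isMax hmx
    have hall : ∀ y ∈ h :: t, y = mx := by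
      intro y hy
      have h1 := hlo y hy
      have h2 := hhi y hy
      simp only at h1 h2
      omega
    have hmem : mx ∈ h :: t := PySem.List.max?_mem hmx
    have hlen' : ((h :: t).erase mx).length = t.length := by
      rw [List.length_erase_of_mem hmem]; simp
    have hne' : (h :: t).erase mx ≠ [] := by
      intro hnil; rw [hnil] at hlen'; simp at hlen'; omega
    obtain ⟨y, hy⟩ := List.exists_mem_of_ne_nil _ hne'
    have hyy : y = mx := hall y (List.mem_of_mem_erase hy)
    rw [hne]; exact hyy ▸ hy
  · have hmnmem : mn ∈ h :: t := PySem.List.min?_mem hmn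
    exact (List.mem_erase_of_ne hne).mpr hmnmem

-- ===== VERDICT (by name: the statement is the Claim_ definition above) =====
theorem sum_array_spec : Claim_equal_sum_array := by
  intro arr _
  unfold Spec_sum_array sum_array sum_array_alt
  match arr with
  | none => rfl
  | some xs =>
    by_cases hg : xs = [] ∨ (xs.length : Int) ≤ 2
    · simp only [if_pos hg]
    · simp only [if_neg hg]
      match xs, hg with
      | h :: t, hg =>
        have hlen : 2 ≤ t.length := by
          push Not at hg; have := hg.2; simp at this; omega
        have hmx := PySem.List.max?_id_cons (x := h) (t := t)
        have hmn := PySem.List.min?_id_cons (x := h) (t := t)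
        rw [hmx, hmn]
        set mx := t.foldl max h with hmxdef
        set mn := t.foldl min h with hmndef
        have hmxmem : mx ∈ h :: t := PySem.List.max?_mem hmx
        have hmnmem' : mn ∈ (h :: t).erase mx := pv_mem_erase_extrema h t hlen hmn hmx
        simp only [PySem.List.remove?_eq_some_erase _ _ hmxmem,
            PySem.List.remove?_eq_some_erase _ _ hmnmem']
        rw [PySem.List.foldl_add (g := fun y => y)]
        simp only [List.map_id']
        rw [pv_sum_erase _ _ hmnmem', pv_sum_erase _ _ hmxmem]
        ring
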